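-- pv_equiv track=rewrite | github.com/sticky-ai/Algorithms | codesignal/arcade/the_core/cipher26.py | cipher26
-- ===== SOURCE A (Python) =====
-- import string
--
-- def cipher26(message):
--     alpha = string.ascii_lowercase
--     answer = ''
--     temp = 0
--
--     for i, j in enumerate(message):
--         answer += alpha[(alpha.find(j) - temp) % 26]
--         temp += (alpha.find(j) - temp) % 26
--     return answer
-- ===== SOURCE B (Python) =====
-- import string
--
-- def cipher26(message):
--     # Staged, state-free pipeline: (1) map every char to its alphabet index,
--     # (2) pair each index with its predecessor (0 before the first) via zip,
--     # (3) map each pair to the letter of the mod-26 difference.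
--     # Correct because A's running sum `temp` is always congruent mod 26 to the
--     # previous character's index, so each output depends only on the pair.
--     alpha = string.ascii_lowercase
--     idx = [alpha.find(c) for c in message]
--     return ''.join(alpha[(c - p) % 26] for c, p in zip(idx, [0] + idx))
-- ===== Notes on version B (the rewrite author's own statement) =====
-- stated objective: alternative
-- what changed: Replaces A's stateful single loop (running-sum accumulator threaded through each step) with a state-free staged pipeline: map chars to indices, zip the index list with its shifted self, and map each adjacent pair to the mod-26 difference letter; correct because temp mod 26 always equals the previous char's index.
import Mathlib
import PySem

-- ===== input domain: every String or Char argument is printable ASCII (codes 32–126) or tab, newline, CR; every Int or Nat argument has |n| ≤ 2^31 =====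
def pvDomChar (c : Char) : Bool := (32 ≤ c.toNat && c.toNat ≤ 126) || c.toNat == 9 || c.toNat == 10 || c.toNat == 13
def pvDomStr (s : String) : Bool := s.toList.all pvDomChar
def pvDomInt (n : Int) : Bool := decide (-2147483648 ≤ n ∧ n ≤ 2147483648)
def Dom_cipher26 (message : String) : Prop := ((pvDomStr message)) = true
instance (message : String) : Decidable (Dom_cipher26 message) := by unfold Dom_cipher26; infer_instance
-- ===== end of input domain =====

-- B replaces A's stateful running-sum loop by a state-free map/zip/map pipeline over pairwise index differences.

-- ===== PORT A =====
def cipher26Alpha : List Char := "abcdefghijklmnopqrstuvwxyz".toList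

-- A's loop: state = (answer so far, temp = running sum)
def cipher26LoopA : List Char → List Char → Int → List Char
  | [], ans, _ => ans
  | j :: rest, ans, temp =>
      cipher26LoopA rest
        (ans ++ [PySem.List.pyGetD cipher26Alpha
                  (PySem.Int.mod (PySem.Chars.find cipher26Alpha [j] - temp) 26) 'a'])
        (temp + PySem.Int.mod (PySem.Chars.find cipher26Alpha [j] - temp) 26)

def cipher26 (message : String) : String :=
  String.ofList (cipher26LoopA message.toList [] 0)

-- ===== PORT B =====
-- stage 1: index of each char; stage 2: zip with shifted self; stage 3: map pairs to letters
def cipher26_alt (message : String) : String :=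
  let idx := message.toList.map (fun c => PySem.Chars.find cipher26Alpha [c])
  String.ofList (((idx.zip (0 :: idx)).map
    (fun p => PySem.List.pyGetD cipher26Alpha (PySem.Int.mod (p.1 - p.2) 26) 'a')))

-- ===== PRECONDITION & SPEC =====
def Spec_cipher26 (message : String) (out : String) : Prop := out = cipher26_alt message
instance (message : String) (out : String) : Decidable (Spec_cipher26 message out) := by unfold Spec_cipher26; infer_instance

-- ===== CLAIM =====
def Claim_equal_cipher26 : Prop := ∀ (message : String), Dom_cipher26 message → Spec_cipher26 message (cipher26 message)

-- ===== LEMMAS AND PROOFS =====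

-- Invariant: A's running sum is congruent mod 26 to B's "previous index" slot,
-- so A's loop output equals B's zipped pairwise-difference map.
theorem cipher26_loopA_eq_zip (l : List Char) :
    ∀ (ans : List Char) (temp prev : Int), temp % 26 = prev % 26 →
      cipher26LoopA l ans temp =
        ans ++ (((l.map (fun c => PySem.Chars.find cipher26Alpha [c])).zip
                  (prev :: l.map (fun c => PySem.Chars.find cipher26Alpha [c]))).map
          (fun p => PySem.List.pyGetD cipher26Alpha (PySem.Int.mod (p.1 - p.2) 26) 'a')) := by
  induction l with
  | nil => intro ans temp prev _; simp [cipher26LoopA]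
  | cons j rest ih =>
      intro ans temp prev h
      have h26 : (0 : Int) < 26 := by norm_num
      simp only [cipher26LoopA, List.map_cons, List.zip_cons_cons, List.map]
      have hd : PySem.Int.mod (PySem.Chars.find cipher26Alpha [j] - temp) 26
              = PySem.Int.mod (PySem.Chars.find cipher26Alpha [j] - prev) 26 := by
        simp only [PySem.Int.mod_eq_emod_of_pos h26]; omega
      rw [hd,
        ih (ans ++ [PySem.List.pyGetD cipher26Alpha
              (PySem.Int.mod (PySem.Chars.find cipher26Alpha [j] - prev) 26) 'a'])
           (temp + PySem.Int.mod (PySem.Chars.find cipher26Alpha [j] - prev) 26)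
           (PySem.Chars.find cipher26Alpha [j])
           (by simp only [PySem.Int.mod_eq_emod_of_pos h26]; omega)]
      simp

-- ===== VERDICT =====
theorem cipher26_spec : Claim_equal_cipher26 := by
  intro message _
  unfold Spec_cipher26 cipher26 cipher26_alt
  rw [cipher26_loopA_eq_zip message.toList [] 0 0 rfl]
  simp
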